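-- pv_equiv track=rewrite | github.com/Ritesh1234-sys/OWASP_Automation | src/request_efficiency_check.py | _status_rollup
-- ===== SOURCE A (Python) =====
-- from typing import Any, Dict, List, Tuple
--
-- def _status_rollup(endpoint_severities: List[str]) -> str:
--     """
--     Compute overall check status from endpoint severities.
--     Order: FAIL(HIGH present) > WARN(MEDIUM present) > PASS
--     NOTE:
--       - If any endpoint has severity=ERROR, we return FAIL.
--       - If at least one HIGH → FAIL
--       - Else if at least one MEDIUM → WARN
--       - Else PASS
--     """
--     if any(s == "ERROR" for s in endpoint_severities):
--         return "FAIL"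
--     if any(s == "HIGH" for s in endpoint_severities):
--         return "FAIL"
--     if any(s == "MEDIUM" for s in endpoint_severities):
--         return "WARN"
--     return "PASS"
-- ===== SOURCE B (Python) =====
-- from typing import List
--
-- def _status_rollup(endpoint_severities: List[str]) -> str:
--     has_medium = False
--     for s in endpoint_severities:
--         if s == "ERROR" or s == "HIGH":
--             return "FAIL"
--         elif s == "MEDIUM":
--             has_medium = True
--     return "WARN" if has_medium else "PASS"
-- ===== Notes on version B (the rewrite author's own statement) =====
-- stated objective: simpler
-- what changed: Replaced three separate any() scans over the list with one early-exit pass that tracks a has_medium flag.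
import Mathlib
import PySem

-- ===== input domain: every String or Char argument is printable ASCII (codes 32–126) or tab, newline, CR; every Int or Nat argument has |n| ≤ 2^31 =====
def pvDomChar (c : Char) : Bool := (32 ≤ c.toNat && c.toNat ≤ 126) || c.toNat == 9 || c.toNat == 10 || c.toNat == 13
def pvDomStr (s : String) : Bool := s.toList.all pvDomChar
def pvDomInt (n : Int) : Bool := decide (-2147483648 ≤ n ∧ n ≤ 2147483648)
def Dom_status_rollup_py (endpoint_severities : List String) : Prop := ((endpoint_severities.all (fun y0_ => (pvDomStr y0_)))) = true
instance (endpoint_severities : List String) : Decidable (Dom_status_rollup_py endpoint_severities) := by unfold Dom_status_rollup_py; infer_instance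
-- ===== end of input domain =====

-- B replaces A's three separate any() scans with one early-exit pass tracking a has_medium flag (simpler).


-- ===== PORT A =====
def status_rollup_py (endpoint_severities : List String) : String :=
  if endpoint_severities.any (fun s => s == "ERROR") then "FAIL"
  else if endpoint_severities.any (fun s => s == "HIGH") then "FAIL"
  else if endpoint_severities.any (fun s => s == "MEDIUM") then "WARN"
  else "PASS"

-- ===== PORT B =====
def status_rollup_py_alt_loop (xs : List String) (has_medium : Bool) : String :=
  match xs with
  | [] => if has_medium then "WARN" else "PASS"
  | s :: rest =>
    if s == "ERROR" || s == "HIGH" then "FAIL"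
    else if s == "MEDIUM" then status_rollup_py_alt_loop rest true
    else status_rollup_py_alt_loop rest has_medium

def status_rollup_py_alt (endpoint_severities : List String) : String :=
  status_rollup_py_alt_loop endpoint_severities false

-- ===== PRECONDITION & SPEC =====
def Spec_status_rollup_py (endpoint_severities : List String) (out : String) : Prop := out = status_rollup_py_alt endpoint_severities
instance (endpoint_severities : List String) (out : String) : Decidable (Spec_status_rollup_py endpoint_severities out) := by unfold Spec_status_rollup_py; infer_instance

-- ===== CLAIM (what is proved, stated in full; the proofs are below) =====
def Claim_equal_status_rollup_py : Prop := ∀ (endpoint_severities : List String), Dom_status_rollup_py endpoint_severities → Spec_status_rollup_py endpoint_severities (status_rollup_py endpoint_severities)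

-- ===== LEMMAS AND PROOFS =====
lemma alt_loop_char (xs : List String) (m : Bool) :
    status_rollup_py_alt_loop xs m =
      if xs.any (fun s => s == "ERROR") || xs.any (fun s => s == "HIGH") then "FAIL"
      else if m || xs.any (fun s => s == "MEDIUM") then "WARN"
      else "PASS" := by
  induction xs generalizing m with
  | nil => simp [status_rollup_py_alt_loop]
  | cons s rest ih =>
    simp only [status_rollup_py_alt_loop, List.any_cons]
    by_cases hE : s = "ERROR" <;> by_cases hH : s = "HIGH" <;> by_cases hM : s = "MEDIUM" <;>
      simp [hE, hH, hM, ih, Bool.or_assoc, Bool.or_comm, Bool.or_left_comm]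

-- ===== VERDICT (by name: the statement is the Claim_ definition above) =====
theorem status_rollup_py_spec : Claim_equal_status_rollup_py := by
  intro xs _
  unfold Spec_status_rollup_py status_rollup_py status_rollup_py_alt
  rw [alt_loop_char]
  by_cases hE : xs.any (fun s => s == "ERROR") <;>
    by_cases hH : xs.any (fun s => s == "HIGH") <;> simp [hE, hH]
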